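-- pv_equiv track=rewrite | github.com/saman1000/exercises | string-practice.py | find_most_common_substring
-- ===== SOURCE A (Python) =====
-- def find_most_common_substring(s: str, length: int) -> str:
--     # TODO: implement the function
--     str_length = len(s)
--     all_subs = {}
--     for i in range(str_length - length + 1):
--         sub_str = s[i: i + length]
--         if all_subs.get(sub_str) is None:
--             all_subs[sub_str] = 1
--         else:
--             all_subs[sub_str] += 1
--     substring = ""
--     max_count = 0
--     for sub, repetition in all_subs.items():
--         if repetition > max_count:
--             substring = sub
--             max_count = repetition
--         elif repetition == max_count:
--             substring = min(substring, sub)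
--     return substring
-- ===== SOURCE B (Python) =====
-- def find_most_common_substring(s: str, length: int) -> str:
--     # sort all length-`length` slices, then run-length scan adjacent equal runs;
--     # first strictly-longer run wins, so the lex-smallest most common substring is kept
--     subs = sorted(s[i: i + length] for i in range(len(s) - length + 1))
--     best, best_count = "", 0
--     run_val, run_count = "", 0
--     for x in subs:
--         if x == run_val:
--             run_count += 1
--         else:
--             if run_count > best_count:
--                 best, best_count = run_val, run_count
--             run_val, run_count = x, 1
--     if run_count > best_count:
--         best = run_val
--     return best
-- ===== Notes on version B (the rewrite author's own statement) =====
-- stated objective: alternative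
-- what changed: Replaces A's dict counting pass plus a min-tiebreak scan over dict items by sorting all length-`length` slices and run-length scanning adjacent equal runs, where the first strictly longer run encountered is automatically the lexicographically smallest most common substring.
import Mathlib
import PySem

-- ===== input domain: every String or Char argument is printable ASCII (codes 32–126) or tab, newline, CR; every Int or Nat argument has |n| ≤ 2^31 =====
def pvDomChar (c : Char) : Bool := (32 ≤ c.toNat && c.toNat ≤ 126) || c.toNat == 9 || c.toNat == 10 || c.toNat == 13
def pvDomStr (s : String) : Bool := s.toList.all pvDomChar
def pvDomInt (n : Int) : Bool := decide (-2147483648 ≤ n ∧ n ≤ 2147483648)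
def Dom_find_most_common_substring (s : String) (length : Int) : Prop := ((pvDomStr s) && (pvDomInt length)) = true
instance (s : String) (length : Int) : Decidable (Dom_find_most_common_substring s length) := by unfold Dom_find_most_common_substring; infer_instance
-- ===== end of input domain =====

-- B replaces A's dict-counting plus min-tiebreak scan by sort-all-slices then a run-length
-- scan of adjacent equal runs (alternative decomposition, same exact result).

-- ===== PORT A =====
-- body of A's counting loop: if all_subs.get(sub) is None: =1 else: +=1
def fmcCount (d : PySem.Dict String Int) (sub_str : String) : PySem.Dict String Int :=
  match d.get? sub_str with
  | none => d.insert sub_str 1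
  | some c => d.insert sub_str (c + 1)

-- body of A's selection loop over items: (substring, max_count) updated per (sub, repetition)
def fmcSel (acc : String × Int) (p : String × Int) : String × Int :=
  if p.2 > acc.2 then (p.1, p.2)
  else if p.2 = acc.2 then (min acc.1 p.1, acc.2)
  else acc

def find_most_common_substring (s : String) (length : Int) : String :=
  let str_length := PySem.Str.len s
  let all_subs :=
    (PySem.List.pyRange 0 (str_length - length + 1) 1).foldl
      (fun d i => fmcCount d (PySem.Str.slice s (some i) (some (i + length))))
      (PySem.Dict.empty : PySem.Dict String Int)
  (all_subs.items.foldl fmcSel ("", 0)).1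

-- ===== PORT B =====
-- body of B's run-length loop: state (best, best_count, run_val, run_count)
def fmcRun (st : String × Int × String × Int) (x : String) : String × Int × String × Int :=
  match st with
  | (best, bc, rv, rc) =>
    if x = rv then (best, bc, rv, rc + 1)
    else if rc > bc then (rv, rc, x, 1)
    else (best, bc, x, 1)

def find_most_common_substring_alt (s : String) (length : Int) : String :=
  -- Python's sorted() ported as Lean's stable List.mergeSort on the same key order
  let subs :=
    ((PySem.List.pyRange 0 (PySem.Str.len s - length + 1) 1).map
        (fun i => PySem.Str.slice s (some i) (some (i + length)))).mergeSort
      (fun a b => decide (a ≤ b))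
  match subs.foldl fmcRun ("", 0, "", 0) with
  | (best, bc, rv, rc) => if rc > bc then rv else best

-- ===== PRECONDITION & SPEC =====
def Spec_find_most_common_substring (s : String) (length : Int) (out : String) : Prop := out = find_most_common_substring_alt s length
instance (s : String) (length : Int) (out : String) : Decidable (Spec_find_most_common_substring s length out) := by unfold Spec_find_most_common_substring; infer_instance

-- ===== CLAIM (what is proved, stated in full; the proofs are below) =====
def Claim_equal_find_most_common_substring : Prop := ∀ (s : String) (length : Int), Dom_find_most_common_substring s length → Spec_find_most_common_substring s length (find_most_common_substring s length)

-- ===== LEMMAS AND PROOFS =====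

theorem str_nil_le (t : String) : "" ≤ t := by
  by_contra h
  rw [not_le] at h
  exact absurd h (by simp [String.lt_iff_toList_lt])

-- A's counting-loop body is the insert-getD counter step
theorem fmcCount_eq : fmcCount = fun d x => d.insert x (d.getD x 0 + 1) := by
  funext d x
  simp only [fmcCount, PySem.Dict.getD_eq_get?_getD]
  cases d.get? x <;> rfl

-- A's selection step is right-commutative
theorem fmcSel_rightComm (a p q : String × Int) : fmcSel (fmcSel a p) q = fmcSel (fmcSel a q) p := by
  obtain ⟨a1, a2⟩ := a; obtain ⟨p1, p2⟩ := p; obtain ⟨q1, q2⟩ := q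
  simp only [fmcSel]
  split_ifs <;> first
    | rfl
    | omega
    | (refine Prod.ext ?_ (by omega) <;> simp only [] <;>
        first | rfl | rw [min_right_comm] | rw [min_comm])

-- run of m copies of the current run value just bumps the counter
theorem fmcRun_same (m : ℕ) (b : String) (c : Int) (v : String) (r : Int) :
    (List.replicate m v).foldl fmcRun (b, c, v, r) = (b, c, v, r + m) := by
  induction m generalizing r with
  | zero => simp
  | succ k ih =>
    rw [List.replicate_succ, List.foldl_cons]
    simp only [fmcRun, if_true]
    rw [ih]
    refine Prod.ext rfl (Prod.ext rfl (Prod.ext rfl ?_))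
    push_cast
    ring

def fmcFlush (st : String × Int × String × Int) : String × Int :=
  if st.2.2.2 > st.2.1 then (st.2.2.1, st.2.2.2) else (st.1, st.2.1)

-- entering a fresh run: flush the pending run, start counting v
theorem fmcRun_fresh (n : ℕ) (hn : 1 ≤ n) (b : String) (c : Int) (v rv : String) (r : Int)
    (h : v ≠ rv ∨ r = 0) (hc : 0 ≤ c) :
    (List.replicate n v).foldl fmcRun (b, c, rv, r) =
      ((fmcFlush (b, c, rv, r)).1, (fmcFlush (b, c, rv, r)).2, v, (n : Int)) := by
  rcases h with h | h
  · obtain ⟨k, rfl⟩ : ∃ k, n = k + 1 := ⟨n - 1, by omega⟩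
    rw [List.replicate_succ, List.foldl_cons]
    simp only [fmcRun, if_neg h]
    by_cases hrb : r > c
    · rw [if_pos hrb, fmcRun_same]
      simp [fmcFlush, hrb]
      ring
    · rw [if_neg hrb, fmcRun_same]
      simp [fmcFlush, hrb]
      ring
  · subst h
    by_cases hv : v = rv
    · subst hv
      rw [fmcRun_same]
      simp [fmcFlush, show ¬ ((0:Int) > c) by omega]
    · obtain ⟨k, rfl⟩ : ∃ k, n = k + 1 := ⟨n - 1, by omega⟩
      rw [List.replicate_succ, List.foldl_cons]
      simp only [fmcRun, if_neg hv, if_neg (show ¬ ((0:Int) > c) by omega)]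
      rw [fmcRun_same]
      simp [fmcFlush, show ¬ ((0:Int) > c) by omega]
      ring

-- main invariant: the run scan over the run decomposition computes the fmcSel fold over (value, count) pairs
theorem fmcRun_main (D : List String) (cnt : String → Int)
    (hp : D.Pairwise (· < ·)) (h1 : ∀ v ∈ D, 1 ≤ cnt v)
    (b : String) (c : Int) (rv : String) (r : Int)
    (hc : 0 ≤ c) (hr : 0 ≤ r)
    (htie : r = c → b ≤ rv)
    (hrv : ∀ v ∈ D, rv < v ∨ r = 0)
    (hb : ∀ v ∈ D, b ≤ v) :
    (match (D.flatMap (fun v => List.replicate (cnt v).toNat v)).foldl fmcRun (b, c, rv, r) with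
     | (best, bc, rv', rc) => if rc > bc then rv' else best) =
      ((D.map (fun v => (v, cnt v))).foldl fmcSel (fmcFlush (b, c, rv, r))).1 := by
  induction D generalizing b c rv r with
  | nil =>
    simp only [List.flatMap_nil, List.foldl_nil, List.map_nil]
    by_cases h : r > c <;> simp [fmcFlush, h]
  | cons v D' ih =>
    have hvpos : 1 ≤ cnt v := h1 v (List.mem_cons_self)
    have hne : v ≠ rv ∨ r = 0 := by
      rcases hrv v List.mem_cons_self with h | h
      · exact Or.inl (ne_of_gt h)
      · exact Or.inr h
    rw [List.flatMap_cons, List.foldl_append,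
        fmcRun_fresh (cnt v).toNat (by omega) b c v rv r hne hc]
    have hcv : ((cnt v).toNat : Int) = cnt v := Int.toNat_of_nonneg (by omega)
    rw [hcv]
    -- flush facts
    have hf1 : 0 ≤ (fmcFlush (b, c, rv, r)).2 := by
      simp only [fmcFlush]; split_ifs <;> omega
    have hfle : (fmcFlush (b, c, rv, r)).1 ≤ v := by
      simp only [fmcFlush]; split_ifs with h
      · rcases hrv v List.mem_cons_self with h' | h'
        · exact le_of_lt h'
        · omega
      · exact hb v List.mem_cons_self
    have hfle' : ∀ w ∈ D', (fmcFlush (b, c, rv, r)).1 ≤ w := by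
      intro w hw
      simp only [fmcFlush]; split_ifs with h
      · rcases hrv w (List.mem_cons_of_mem _ hw) with h' | h'
        · exact le_of_lt h'
        · omega
      · exact hb w (List.mem_cons_of_mem _ hw)
    generalize hF : fmcFlush (b, c, rv, r) = F at hf1 hfle hfle' ⊢
    obtain ⟨f1, f2⟩ := F
    rw [ih (List.Pairwise.of_cons hp) (fun w hw => h1 w (List.mem_cons_of_mem _ hw))
        f1 f2 v (cnt v)
        hf1 (by omega)
        (fun _ => hfle)
        (fun w hw => Or.inl ((List.pairwise_cons.mp hp).1 w hw))
        hfle']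
    rw [List.map_cons, List.foldl_cons]
    -- flushing the new pending run equals one fmcSel step
    have hstep : fmcFlush (f1, f2, v, cnt v) = fmcSel (f1, f2) (v, cnt v) := by
      simp only [fmcFlush, fmcSel]
      split_ifs with h2 h3
      · rfl
      · exact Prod.ext (min_eq_left hfle).symm rfl
      · rfl
    rw [hstep]

-- count of an element in the run decomposition
theorem count_flatMap_replicate (x : String) (cnt : String → ℕ) (D : List String) (hnd : D.Nodup) :
    (D.flatMap (fun v => List.replicate (cnt v) v)).count x = if x ∈ D then cnt x else 0 := by
  induction D with
  | nil => simp
  | cons v D' ih =>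
    rw [List.flatMap_cons, List.count_append, List.count_replicate,
        ih (List.Nodup.of_cons hnd)]
    by_cases hx : x = v
    · subst hx
      simp [(List.nodup_cons.mp hnd).1]
    · simp [hx, Ne.symm hx]

-- the run decomposition is ≤-sorted
theorem pairwise_flatMap_replicate (cnt : String → ℕ) (D : List String)
    (hp : D.Pairwise (· < ·)) :
    (D.flatMap (fun v => List.replicate (cnt v) v)).Pairwise (· ≤ ·) := by
  induction D with
  | nil => simp
  | cons v D' ih =>
    rw [List.flatMap_cons, List.pairwise_append]
    refine ⟨List.pairwise_replicate.mpr (Or.inr le_rfl), ih (List.Pairwise.of_cons hp), ?_⟩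
    intro a ha b hb
    obtain rfl := List.eq_of_mem_replicate ha
    obtain ⟨w, hw, hbw⟩ := List.mem_flatMap.mp hb
    obtain rfl := List.eq_of_mem_replicate hbw
    exact le_of_lt ((List.pairwise_cons.mp hp).1 _ hw)

-- sorted(L) is the concatenation of runs over the sorted distinct values
theorem sorted_eq_flatMap (L : List String) :
    L.mergeSort (fun a b => decide (a ≤ b)) =
      (PySem.List.sorted (PySem.Set.ofList L) (fun x => x) false).flatMap
        (fun v => List.replicate (L.count v) v) := by
  set D := PySem.List.sorted (PySem.Set.ofList L) (fun x => x) false with hD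
  have hperm : D.Perm (PySem.Set.ofList L) := PySem.List.sorted_perm _ _ _
  have hnd : D.Nodup := hperm.nodup_iff.mpr (PySem.Set.nodup_ofList L)
  have hmem : ∀ x, x ∈ D ↔ x ∈ L := by
    intro x
    rw [hperm.mem_iff, PySem.Set.mem_ofList]
  have hp : D.Pairwise (· < ·) := PySem.List.sorted_ofList_pairwise_lt L
  have hpermL : (D.flatMap (fun v => List.replicate (L.count v) v)).Perm L := by
    rw [List.perm_iff_count]
    intro x
    rw [count_flatMap_replicate x _ D hnd]
    by_cases hx : x ∈ L
    · simp [(hmem x).mpr hx]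
    · simp [fun h => hx ((hmem x).mp h), List.count_eq_zero_of_not_mem hx]
  refine List.Perm.eq_of_pairwise (le := fun a b => a ≤ b)
    (fun a b _ _ hab hba => le_antisymm hab hba) ?_ ?_
    (((List.mergeSort_perm L _)).trans hpermL.symm)
  · have := List.pairwise_mergeSort (le := fun a b : String => decide (a ≤ b))
      (fun a b c hab hbc => by simp_all; exact le_trans hab hbc)
      (fun a b => by simp [le_total]) L
    simpa using this
  · exact pairwise_flatMap_replicate _ D hp

-- the list of all length-`length` slices
def fmcSubs (s : String) (length : Int) : List String :=
  (PySem.List.pyRange 0 (PySem.Str.len s - length + 1) 1).map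
    (fun i => PySem.Str.slice s (some i) (some (i + length)))

-- A computes the fmcSel fold over the distinct values with their counts
theorem portA_eq (s : String) (length : Int) :
    find_most_common_substring s length =
      (((PySem.Set.ofList (fmcSubs s length)).map
          (fun k => (k, (List.count k (fmcSubs s length) : Int)))).foldl fmcSel ("", 0)).1 := by
  unfold find_most_common_substring
  dsimp only
  have : (PySem.List.pyRange 0 (PySem.Str.len s - length + 1) 1).foldl
      (fun d i => fmcCount d (PySem.Str.slice s (some i) (some (i + length))))
      (PySem.Dict.empty : PySem.Dict String Int)
      = (fmcSubs s length).foldl fmcCount PySem.Dict.empty := by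
    rw [fmcSubs, List.foldl_map]
  rw [this, fmcCount_eq, PySem.Dict.foldl_insert_getD_add_one_eq_counter,
      PySem.Dict.items_counter]

-- B computes the same fold, over the sorted distinct values
theorem portB_eq (s : String) (length : Int) :
    find_most_common_substring_alt s length =
      (((PySem.List.sorted (PySem.Set.ofList (fmcSubs s length)) (fun x => x) false).map
          (fun k => (k, (List.count k (fmcSubs s length) : Int)))).foldl fmcSel ("", 0)).1 := by
  unfold find_most_common_substring_alt
  dsimp only
  rw [show (PySem.List.pyRange 0 (PySem.Str.len s - length + 1) 1).map
        (fun i => PySem.Str.slice s (some i) (some (i + length))) = fmcSubs s length from rfl,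
      sorted_eq_flatMap]
  set L := fmcSubs s length
  set D := PySem.List.sorted (PySem.Set.ofList L) (fun x => x) false with hD
  have hp : D.Pairwise (· < ·) := PySem.List.sorted_ofList_pairwise_lt L
  have hperm : D.Perm (PySem.Set.ofList L) := PySem.List.sorted_perm _ _ _
  have hmemL : ∀ x ∈ D, x ∈ L := fun x hx => (PySem.Set.mem_ofList L x).mp (hperm.mem_iff.mp hx)
  have h1 : ∀ v ∈ D, 1 ≤ ((List.count v L : Int)) := by
    intro v hv
    have := List.count_pos_iff.mpr (hmemL v hv)
    omega
  have hcnt : ∀ v, List.replicate (List.count v L) v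
      = List.replicate ((List.count v L : Int)).toNat v := by
    intro v; simp
  have := fmcRun_main D (fun v => (List.count v L : Int)) hp h1 "" 0 "" 0
    le_rfl le_rfl (fun _ => le_rfl)
    (fun v _ => Or.inr rfl) (fun v _ => str_nil_le v)
  simp only [List.flatMap] at this ⊢
  rw [show (D.map fun v => List.replicate (List.count v L) v)
        = D.map (fun v => List.replicate ((List.count v L : Int)).toNat v) from
      List.map_congr_left (fun v _ => hcnt v)]
  rw [show fmcFlush ("", 0, "", 0) = ("", 0) from rfl] at this
  exact this

-- ===== VERDICT (by name: the statement is the Claim_ definition above) =====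
theorem find_most_common_substring_spec : Claim_equal_find_most_common_substring := by
  intro s length _
  unfold Spec_find_most_common_substring
  rw [portA_eq, portB_eq]
  haveI : RightCommutative fmcSel := ⟨fun b a₁ a₂ => fmcSel_rightComm b a₁ a₂⟩
  exact congrArg Prod.fst
    (List.Perm.foldl_eq (List.Perm.map _ (PySem.List.sorted_perm _ _ _)) ("", 0)).symm
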